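-- pv_equiv track=rewrite | github.com/pilixiaohui/testnovel | orchestrator/migrate_dev_plan_phases.py | _split_task_blocks
-- ===== SOURCE A (Python) =====
-- def _split_task_blocks(lines: list[str]) -> tuple[list[str], list[list[str]]]:
--     """
--     Split dev_plan.md into (preamble, task_blocks).
--
--     A task block starts at a line beginning with '### ' and continues until the next task header or EOF.
--     """
--     preamble: list[str] = []
--     blocks: list[list[str]] = []
--     current: list[str] | None = None
--
--     for line in lines:
--         if line.startswith("### "):
--             if current is None:
--                 current = [line]
--             else:
--                 blocks.append(current)
--                 current = [line]
--             continue
--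
--         if current is None:
--             preamble.append(line)
--         else:
--             current.append(line)
--
--     if current is not None:
--         blocks.append(current)
--
--     return preamble, blocks
-- ===== SOURCE B (Python) =====
-- def _span_non_header(xs):
--     for i, x in enumerate(xs):
--         if x.startswith("### "):
--             return xs[:i], xs[i:]
--     return xs[:], []
--
--
-- def _split_task_blocks(lines: list[str]) -> tuple[list[str], list[list[str]]]:
--     preamble, rest = _span_non_header(lines)
--     blocks = []
--     while rest:
--         head, body = rest[0], rest[1:]
--         chunk, rest = _span_non_header(body)
--         blocks.append([head] + chunk)
--     return preamble, blocks
-- ===== Notes on version B (the rewrite author's own statement) =====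
-- stated objective: simpler
-- what changed: Replaces the single fold with an Optional current-block accumulator by a span-based decomposition: split off the non-header prefix once, then repeatedly take a header and the span of following non-header lines as one block.
import Mathlib
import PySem

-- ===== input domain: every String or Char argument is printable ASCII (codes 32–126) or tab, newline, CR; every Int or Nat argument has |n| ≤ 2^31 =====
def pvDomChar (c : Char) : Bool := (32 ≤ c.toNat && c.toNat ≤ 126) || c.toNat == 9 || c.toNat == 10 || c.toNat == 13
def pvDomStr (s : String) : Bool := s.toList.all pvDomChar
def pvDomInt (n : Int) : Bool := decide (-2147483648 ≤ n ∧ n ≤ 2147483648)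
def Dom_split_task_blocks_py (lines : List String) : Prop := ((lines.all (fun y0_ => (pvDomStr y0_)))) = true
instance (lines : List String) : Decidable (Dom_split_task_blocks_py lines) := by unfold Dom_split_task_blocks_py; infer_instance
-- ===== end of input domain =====

-- B replaces A's fold over an Optional current-block accumulator by a span-based
-- decomposition (non-header prefix once, then header + span of non-headers per block); objective: simpler.

-- ===== PORT A =====
-- the header test `line.startswith("### ")` (shared helper)
def pvIsHdr (l : String) : Bool := PySem.Str.startswith l "### "

-- one step of A's for-loop over state (preamble, blocks, current)
def pvStepA (s : List String × List (List String) × Option (List String)) (line : String) :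
    List String × List (List String) × Option (List String) :=
  if pvIsHdr line then
    match s.2.2 with
    | none => (s.1, s.2.1, some [line])
    | some cur => (s.1, s.2.1 ++ [cur], some [line])
  else
    match s.2.2 with
    | none => (s.1 ++ [line], s.2.1, none)
    | some cur => (s.1, s.2.1, some (cur ++ [line]))

def split_task_blocks_py (lines : List String) : List String × List (List String) :=
  let s := lines.foldl pvStepA ([], [], none)
  match s.2.2 with
  | none => (s.1, s.2.1)
  | some cur => (s.1, s.2.1 ++ [cur])

-- ===== PORT B =====
-- _span_non_header: longest non-header prefix and the remainder
def pvSpanNonHeader (xs : List String) : List String × List String :=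
  (xs.takeWhile (fun x => !(pvIsHdr x)),
   xs.dropWhile (fun x => !(pvIsHdr x)))

-- B's while-loop over `rest`
def pvGoBlocks : List String → List (List String)
  | [] => []
  | h :: t =>
    let p := pvSpanNonHeader t
    (h :: p.1) :: pvGoBlocks p.2
termination_by ls => ls.length
decreasing_by
  simp only [pvSpanNonHeader]
  exact Nat.lt_succ_of_le (List.length_dropWhile_le _ _)

def split_task_blocks_py_alt (lines : List String) : List String × List (List String) :=
  let s := pvSpanNonHeader lines
  (s.1, pvGoBlocks s.2)

-- ===== PRECONDITION & SPEC =====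
def Spec_split_task_blocks_py (lines : List String) (out : List String × List (List String)) : Prop := out = split_task_blocks_py_alt lines
instance (lines : List String) (out : List String × List (List String)) : Decidable (Spec_split_task_blocks_py lines out) := by unfold Spec_split_task_blocks_py; infer_instance

-- ===== CLAIM (what is proved, stated in full; the proofs are below) =====
def Claim_equal_split_task_blocks_py : Prop := ∀ (lines : List String), Dom_split_task_blocks_py lines → Spec_split_task_blocks_py lines (split_task_blocks_py lines)

-- ===== LEMMAS AND PROOFS =====

-- blocks produced by A once a current block `cur` is open, reading the remaining lines
def pvBlocksFrom (cur : List String) : List String → List (List String)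
  | [] => [cur]
  | l :: t =>
    if pvIsHdr l then cur :: pvBlocksFrom [l] t
    else pvBlocksFrom (cur ++ [l]) t

def pvFinalize (s : List String × List (List String) × Option (List String)) :
    List String × List (List String) :=
  match s.2.2 with
  | none => (s.1, s.2.1)
  | some cur => (s.1, s.2.1 ++ [cur])

theorem foldl_some (ls : List String) : ∀ (pre : List String) (bs : List (List String))
    (cur : List String),
    pvFinalize (ls.foldl pvStepA (pre, bs, some cur)) = (pre, bs ++ pvBlocksFrom cur ls) := by
  induction ls with
  | nil => intro pre bs cur; simp [pvFinalize, pvBlocksFrom]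
  | cons l t ih =>
    intro pre bs cur
    by_cases h : pvIsHdr l = true
    · simp [List.foldl_cons, pvStepA, h, ih, pvBlocksFrom]
    · simp [List.foldl_cons, pvStepA, h, ih, pvBlocksFrom]

theorem foldl_none (ls : List String) : ∀ (pre : List String),
    pvFinalize (ls.foldl pvStepA (pre, [], none)) =
      match ls.dropWhile (fun x => !(pvIsHdr x)) with
      | [] => (pre ++ ls, [])
      | h :: t => (pre ++ ls.takeWhile (fun x => !(pvIsHdr x)),
                   pvBlocksFrom [h] t) := by
  induction ls with
  | nil => intro pre; simp [pvFinalize]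
  | cons l t ih =>
    intro pre
    by_cases h : pvIsHdr l = true
    · simp [List.foldl_cons, pvStepA, h, foldl_some, List.dropWhile_cons, List.takeWhile_cons]
    · simp only [List.foldl_cons, pvStepA, h, Bool.false_eq_true, if_false]
      rw [ih]
      simp only [List.dropWhile_cons, List.takeWhile_cons, h, Bool.not_false, if_true]
      cases t.dropWhile (fun x => !(pvIsHdr x)) <;> simp

theorem blocksFrom_eq_go (ls : List String) : ∀ (cur : List String),
    pvBlocksFrom cur ls =
      (cur ++ ls.takeWhile (fun x => !(pvIsHdr x))) ::
        pvGoBlocks (ls.dropWhile (fun x => !(pvIsHdr x))) := by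
  induction ls with
  | nil => intro cur; simp [pvBlocksFrom, pvGoBlocks]
  | cons l t ih =>
    intro cur
    by_cases h : pvIsHdr l = true
    · simp [pvBlocksFrom, h, List.takeWhile_cons, List.dropWhile_cons, pvGoBlocks,
        pvSpanNonHeader, ih]
    · simp [pvBlocksFrom, h, List.takeWhile_cons, List.dropWhile_cons, ih]

-- ===== VERDICT (by name: the statement is the Claim_ definition above) =====
theorem split_task_blocks_py_spec : Claim_equal_split_task_blocks_py := by
  intro lines _
  show split_task_blocks_py lines = split_task_blocks_py_alt lines
  have hA : split_task_blocks_py lines = pvFinalize (lines.foldl pvStepA ([], [], none)) := rfl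
  rw [hA, foldl_none lines []]
  unfold split_task_blocks_py_alt pvSpanNonHeader
  cases hd : lines.dropWhile (fun x => !(pvIsHdr x)) with
  | nil =>
    have := List.takeWhile_append_dropWhile
      (p := fun x => !(pvIsHdr x)) (l := lines)
    rw [hd, List.append_nil] at this
    simp [hd, this, pvGoBlocks]
  | cons h t =>
    have ht : t.takeWhile (fun x => !(pvIsHdr x)) = t.takeWhile (fun x => !(pvIsHdr x)) := rfl
    simp [hd, pvGoBlocks, pvSpanNonHeader, blocksFrom_eq_go]
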